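-- pv_equiv track=rewrite | github.com/A-lan-Z/datahub-parser-testing | report_utils.py | _normalize_error_label
-- ===== SOURCE A (Python) =====
-- from typing import Any, Dict, List, Optional, Sequence, Set, Tuple, TYPE_CHECKING
--
-- def _normalize_error_label(error_value: Any) -> str:
--     if error_value is None:
--         return "<none>"
--     if not isinstance(error_value, str):
--         return str(error_value)
--     text = error_value.strip()
--     if not text:
--         return "<none>"
--     cut_idx: Optional[int] = None
--     for delimiter in (":", ".", "<"):
--         idx = text.find(delimiter)
--         if idx != -1 and (cut_idx is None or idx < cut_idx):
--             cut_idx = idx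
--     if cut_idx is not None:
--         text = text[:cut_idx]
--     return text.strip() or "<unknown>"
-- ===== SOURCE B (Python) =====
-- def _normalize_error_label(error_value):
--     if error_value is None:
--         return "<none>"
--     if not isinstance(error_value, str):
--         return str(error_value)
--     text = error_value.strip()
--     if not text:
--         return "<none>"
--     for delimiter in (":", ".", "<"):
--         text = text.split(delimiter, 1)[0]
--     return text.strip() or "<unknown>"
-- ===== Notes on version B (the rewrite author's own statement) =====
-- stated objective: simpler
-- what changed: A computes the minimum of three str.find indices in an Optional accumulator and slices once at it; B never computes an index at all: it truncates the text by three successive split(delimiter, 1)[0] passes, keeping the part left of each delimiter.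
import Mathlib
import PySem

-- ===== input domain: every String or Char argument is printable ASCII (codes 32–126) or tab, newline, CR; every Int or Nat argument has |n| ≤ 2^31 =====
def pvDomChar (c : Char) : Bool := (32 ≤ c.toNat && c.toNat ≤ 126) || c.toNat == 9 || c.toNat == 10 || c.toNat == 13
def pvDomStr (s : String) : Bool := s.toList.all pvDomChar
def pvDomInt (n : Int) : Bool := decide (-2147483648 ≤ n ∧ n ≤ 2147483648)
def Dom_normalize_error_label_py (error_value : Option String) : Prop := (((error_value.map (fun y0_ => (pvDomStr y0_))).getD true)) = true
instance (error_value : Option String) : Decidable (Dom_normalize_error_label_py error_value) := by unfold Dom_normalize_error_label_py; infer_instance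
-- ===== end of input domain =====

-- B replaces A's min-of-three-find-indices-then-slice by three successive
-- split(delimiter, 1)[0] truncations, with no index computation (objective: simpler).

-- ===== PORT A =====
-- loop body of A's 'for delimiter in (":", ".", "<")'
def pvStepA (text : String) (cut : Option Int) (d : String) : Option Int :=
  let idx := PySem.Str.find text d
  if idx ≠ -1 ∧ (∀ c ∈ cut, idx < c) then some idx else cut

def normalize_error_label_py (error_value : Option String) : String :=
  match error_value with
  | none => "<none>"
  | some s =>
    let text := PySem.Str.strip s
    if text = "" then "<none>"
    else
      let cut_idx : Option Int := [":", ".", "<"].foldl (pvStepA text) none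
      let text' := match cut_idx with
        | some c => PySem.Str.slice text none (some c)   -- text[:cut_idx]
        | none => text
      let r := PySem.Str.strip text'
      if r = "" then "<unknown>" else r

-- ===== PORT B =====
-- loop body of B's 'for delimiter in (":", ".", "<")': text = text.split(delimiter, 1)[0]
-- (delimiter ≠ "" so splitMax? is some; str.split never returns an empty list, so [0] is the head)
def pvStepB (text : String) (d : String) : String :=
  ((PySem.Str.splitMax? text d 1).getD []).headD ""

def normalize_error_label_py_alt (error_value : Option String) : String :=
  match error_value with
  | none => "<none>"
  | some s =>
    let text := PySem.Str.strip s
    if text = "" then "<none>"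
    else
      let text' := [":", ".", "<"].foldl pvStepB text
      let r := PySem.Str.strip text'
      if r = "" then "<unknown>" else r

-- ===== PRECONDITION & SPEC =====
def Spec_normalize_error_label_py (error_value : Option String) (out : String) : Prop := out = normalize_error_label_py_alt error_value
instance (error_value : Option String) (out : String) : Decidable (Spec_normalize_error_label_py error_value out) := by unfold Spec_normalize_error_label_py; infer_instance

-- ===== CLAIM (what is proved, stated in full; the proofs are below) =====
def Claim_equal_normalize_error_label_py : Prop := ∀ (error_value : Option String), Dom_normalize_error_label_py error_value → Spec_normalize_error_label_py error_value (normalize_error_label_py error_value)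

-- ===== LEMMAS AND PROOFS =====

-- c in (":", ".", "<") — the proofs' characterisation of both ports' delimiter set
def pvDelim (c : Char) : Bool := c == ':' || c == '.' || c == '<'

theorem pv_singleton_prefix_iff {α : Type} (a : α) (l : List α) : [a] <+: l ↔ l.head? = some a := by
  cases l with
  | nil => simp
  | cons x xs =>
    constructor
    · rintro ⟨t, ht⟩; simp at ht; simp [ht.1]
    · intro h; simp at h; exact ⟨xs, by simp [h]⟩

theorem pv_singleton_prefix_drop_iff {α : Type} (a : α) (l : List α) (k : Nat) :
    [a] <+: l.drop k ↔ l[k]? = some a := by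
  rw [pv_singleton_prefix_iff, List.head?_drop]

-- A-side: facts about text.find(d) relative to the first delimiter position
theorem pv_find_facts (t : List Char) (i : Nat) (hi : i < t.length)
    (hmin : ∀ j (_ : j < i), ¬ pvDelim t[j] = true) (c : Char) (hc : pvDelim c = true) :
    (PySem.Chars.find t [c] = -1 ∨ (i : Int) ≤ PySem.Chars.find t [c]) ∧
      (t[i] = c → PySem.Chars.find t [c] = (i : Int)) := by
  by_cases hneg : PySem.Chars.find t [c] = -1
  · refine ⟨Or.inl hneg, fun hic => ?_⟩
    exfalso
    rw [PySem.Chars.find_eq_neg_one_iff] at hneg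
    have hpre : [c] <+: t.drop i := (pv_singleton_prefix_drop_iff c t i).mpr
      (by rw [List.getElem?_eq_getElem hi, hic])
    exact hneg (hpre.isInfix.trans (List.drop_suffix i t).isInfix)
  · have h0 : 0 ≤ PySem.Chars.find t [c] := by
      have := PySem.Chars.neg_one_le_find t [c]; omega
    obtain ⟨hpre, hlo⟩ := PySem.Chars.find_spec h0
    have hget : t[(PySem.Chars.find t [c]).toNat]? = some c :=
      (pv_singleton_prefix_drop_iff c t _).mp hpre
    have hile : i ≤ (PySem.Chars.find t [c]).toNat := by
      by_contra hlt
      push Not at hlt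
      have hlen : (PySem.Chars.find t [c]).toNat < t.length := by omega
      rw [List.getElem?_eq_getElem hlen] at hget
      simp at hget
      exact hmin _ hlt (by rw [hget]; exact hc)
    refine ⟨Or.inr (by omega), fun hic => ?_⟩
    have hle : (PySem.Chars.find t [c]).toNat ≤ i := by
      by_contra hgt
      push Not at hgt
      exact hlo i hgt ((pv_singleton_prefix_drop_iff c t i).mpr
        (by rw [List.getElem?_eq_getElem hi, hic]))
    omega

-- A's running-minimum cut index IS the index of the first delimiter character
theorem pv_cutA_eq (text : String) :
    [":", ".", "<"].foldl (pvStepA text) none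
      = (text.toList.findIdx? pvDelim).map (fun i => (i : Int)) := by
  have e1 : (":" : String).toList = [':'] := by decide
  have e2 : ("." : String).toList = ['.'] := by decide
  have e3 : ("<" : String).toList = ['<'] := by decide
  cases h : text.toList.findIdx? pvDelim with
  | none =>
    have hall := List.findIdx?_eq_none_iff.mp h
    have hf : ∀ (c : Char), pvDelim c = true → PySem.Chars.find text.toList [c] = -1 := by
      intro c hc
      rw [PySem.Chars.find_eq_neg_one_iff]
      intro hinf
      have hm : c ∈ text.toList := by
        have := hinf.subset (l₁ := [c]) (List.mem_singleton_self c)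
        exact this
      have := hall c hm
      rw [hc] at this; exact Bool.noConfusion this
    have h1 := hf ':' (by decide)
    have h2 := hf '.' (by decide)
    have h3 := hf '<' (by decide)
    simp [List.foldl, pvStepA, PySem.Str.find_eq, e1, e2, e3, h1, h2, h3]
  | some i =>
    obtain ⟨hi, hp, hmin⟩ := List.findIdx?_eq_some_iff_getElem.mp h
    have f1 := pv_find_facts text.toList i hi hmin ':' (by decide)
    have f2 := pv_find_facts text.toList i hi hmin '.' (by decide)
    have f3 := pv_find_facts text.toList i hi hmin '<' (by decide)
    have hcase : text.toList[i] = ':' ∨ text.toList[i] = '.' ∨ text.toList[i] = '<' := by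
      simp only [pvDelim, Bool.or_eq_true, beq_iff_eq] at hp
      rcases hp with (h | h) | h
      · exact Or.inl h
      · exact Or.inr (Or.inl h)
      · exact Or.inr (Or.inr h)
    simp only [List.foldl, pvStepA, PySem.Str.find_eq, e1, e2, e3]
    rcases f1 with ⟨d1, q1⟩; rcases f2 with ⟨d2, q2⟩; rcases f3 with ⟨d3, q3⟩
    rcases hcase with hc | hc | hc
    · have := q1 hc
      split_ifs <;> simp_all <;> omega
    · have := q2 hc
      split_ifs <;> simp_all <;> omega
    · have := q3 hc
      split_ifs <;> simp_all <;> omega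

theorem pv_sliceA_eq (text : String) (i : Nat) :
    PySem.Str.slice text none (some (i : Int)) = String.ofList (text.toList.take i) := by
  have h : (PySem.Str.slice text none (some (i : Int))).toList = text.toList.take i := by
    rw [PySem.Str.toList_slice, PySem.Chars.slice_eq_listSlice, PySem.List.slice_to_natCast]
  rw [← String.ofList_toList (s := PySem.Str.slice text none (some (i : Int))), h]

-- B-side: split's worker with maxsplit exhausted keeps the rest as one piece
theorem pv_go_zero (c : Char) (fuel : Nat) (l cur : List Char) (acc : List (List Char)) :
    PySem.Chars.splitOnMax.go [c] fuel 0 l cur acc = ((cur.reverse ++ l) :: acc).reverse := by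
  cases fuel <;> cases l <;> simp [PySem.Chars.splitOnMax.go]

-- B-side: split's worker with maxsplit 1 cuts at the first occurrence of c
theorem pv_go_one (c : Char) (fuel : Nat) (l cur : List Char) (acc : List (List Char))
    (hfuel : l.length < fuel) :
    PySem.Chars.splitOnMax.go [c] fuel 1 l cur acc =
      acc.reverse ++ (cur.reverse ++ l.takeWhile (fun a => a != c)) ::
        (if c ∈ l then [(l.dropWhile (fun a => a != c)).tail] else []) := by
  induction fuel generalizing l cur acc with
  | zero => omega
  | succ fuel ih =>
    cases l with
    | nil => simp [PySem.Chars.splitOnMax.go]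
    | cons h rest =>
      by_cases hc : h = c
      · subst hc
        simp only [PySem.Chars.splitOnMax.go]
        simp [pv_go_zero]
      · simp only [PySem.Chars.splitOnMax.go]
        have hpre : ¬ List.isPrefixOf [c] (h :: rest) = true := by
          simp [List.isPrefixOf_cons₂]
          intro hch; exact absurd hch.symm hc
        simp only [if_neg (by decide : ¬ (1 : Nat) = 0), hpre, Bool.false_eq_true, if_false]
        rw [ih rest (h :: cur) acc (by simpa using Nat.lt_of_succ_lt_succ hfuel)]
        have hch : ¬ c = h := fun e => hc e.symm
        simp [hc, bne, hch]

-- B's step text.split(d, 1)[0] is the longest prefix of text without the character of d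
theorem pv_stepB_toList (text : String) (d : String) (c : Char) (hd : d.toList = [c]) :
    (pvStepB text d).toList = text.toList.takeWhile (fun a => a != c) := by
  have hmap := PySem.Str.splitMax?_map text d 1
  rw [hd] at hmap
  have hsplit : PySem.Chars.splitMax? text.toList [c] 1
      = some (PySem.Chars.splitOnMax text.toList [c] 1) := by
    simp [PySem.Chars.splitMax?]
  rw [hsplit] at hmap
  have hgo : PySem.Chars.splitOnMax text.toList [c] 1
      = (text.toList.takeWhile (fun a => a != c)) ::
          (if c ∈ text.toList then [(text.toList.dropWhile (fun a => a != c)).tail] else []) := by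
    rw [PySem.Chars.splitOnMax]
    rw [if_neg (by omega)]
    have h1 : (1 : Int).toNat = 1 := rfl
    rw [h1, pv_go_one c (text.toList.length + 1) text.toList [] [] (by omega)]
    simp
  rw [hgo] at hmap
  cases hL : PySem.Str.splitMax? text d 1 with
  | none => rw [hL] at hmap; exact absurd hmap (by simp)
  | some L =>
    rw [hL] at hmap
    simp only [Option.map_some, Option.some.injEq] at hmap
    cases L with
    | nil => exact absurd hmap (by simp)
    | cons h t =>
      simp only [List.map_cons, List.cons.injEq] at hmap
      simp [pvStepB, hL, hmap.1]

-- the three successive truncations together keep the longest delimiter-free prefix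
theorem pv_foldB_toList (text : String) :
    ([":", ".", "<"].foldl pvStepB text).toList
      = text.toList.takeWhile (fun a => !pvDelim a) := by
  simp only [List.foldl]
  rw [pv_stepB_toList _ "<" '<' (by decide),
      pv_stepB_toList _ "." '.' (by decide),
      pv_stepB_toList _ ":" ':' (by decide)]
  rw [List.takeWhile_takeWhile, List.takeWhile_takeWhile]
  congr 1
  funext a
  by_cases h1 : a = ':' <;> by_cases h2 : a = '.' <;> by_cases h3 : a = '<' <;>
    simp [pvDelim, h1, h2, h3]

-- the longest delimiter-free prefix is the cut at the first delimiter index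
theorem pv_takeWhile_findIdx (p : Char → Bool) (l : List Char) :
    l.takeWhile (fun a => !p a)
      = match l.findIdx? p with
        | some i => l.take i
        | none => l := by
  induction l with
  | nil => simp
  | cons h t ih =>
    by_cases hp : p h
    · simp [List.findIdx?_cons, hp]
    · simp only [List.takeWhile_cons, List.findIdx?_cons, hp, Bool.not_false,
        Bool.false_eq_true, if_false]
      rw [ih]
      cases h2 : t.findIdx? p <;> simp

-- ===== VERDICT (by name: the statement is the Claim_ definition above) =====
theorem normalize_error_label_py_spec : Claim_equal_normalize_error_label_py := by
  intro ev _
  unfold Spec_normalize_error_label_py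
  cases ev with
  | none => rfl
  | some s =>
    simp only [normalize_error_label_py, normalize_error_label_py_alt]
    by_cases h0 : PySem.Str.strip s = ""
    · simp [h0]
    · simp only [h0, if_false, pv_cutA_eq]
      have hB : ([":", ".", "<"].foldl pvStepB (PySem.Str.strip s))
          = String.ofList ((PySem.Str.strip s).toList.takeWhile (fun a => !pvDelim a)) := by
        rw [← String.ofList_toList
          (s := [":", ".", "<"].foldl pvStepB (PySem.Str.strip s)), pv_foldB_toList]
      rw [hB, pv_takeWhile_findIdx]
      cases h : (PySem.Str.strip s).toList.findIdx? pvDelim with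
      | none => rw [String.ofList_toList]; simp
      | some i => simp [pv_sliceA_eq]
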